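-- pv_equiv track=rewrite | github.com/soyukke/lean-unsolved | scripts/collatz_syracuse_permgroup.py | perm_order_from_cycles
-- ===== SOURCE A (Python) =====
-- from math import gcd, log2
--
-- def perm_order_from_cycles(cycles):
--     """置換の位数 = 巡回長のLCM"""
--     lengths = [len(c) for c in cycles]
--     if not lengths:
--         return 1
--     result = lengths[0]
--     for l in lengths[1:]:
--         result = result * l // gcd(result, l)
--     return result
-- ===== SOURCE B (Python) =====
-- def _factorize(n):
--     """Trial-division prime factorization: dict prime -> exponent."""
--     f = {}
--     d = 2
--     while d * d <= n:
--         e = 0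
--         while n % d == 0:
--             n //= d
--             e += 1
--         if e > 0:
--             f[d] = e
--         d += 1
--     if n > 1:
--         f[n] = 1
--     return f
--
--
-- def perm_order_from_cycles(cycles):
--     """置換の位数 = 巡回長のLCM (computed as product of prime^max-exponent)"""
--     maxexp = {}
--     for c in cycles:
--         l = len(c)
--         if l == 0:
--             return 0
--         for p, e in _factorize(l).items():
--             if e > maxexp.get(p, 0):
--                 maxexp[p] = e
--     result = 1
--     for p, e in maxexp.items():
--         result *= p ** e
--     return result
-- ===== Notes on version B (the rewrite author's own statement) =====
-- stated objective: alternative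
-- what changed: Replaces A's running gcd-based LCM fold by a different algorithm: trial-division factorization of each cycle length into primes, a dict keeping the maximum exponent seen per prime, and a final product of prime**max_exponent (returning 0 early on an empty cycle, matching A's lcm-with-0 behaviour).
import Mathlib
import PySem

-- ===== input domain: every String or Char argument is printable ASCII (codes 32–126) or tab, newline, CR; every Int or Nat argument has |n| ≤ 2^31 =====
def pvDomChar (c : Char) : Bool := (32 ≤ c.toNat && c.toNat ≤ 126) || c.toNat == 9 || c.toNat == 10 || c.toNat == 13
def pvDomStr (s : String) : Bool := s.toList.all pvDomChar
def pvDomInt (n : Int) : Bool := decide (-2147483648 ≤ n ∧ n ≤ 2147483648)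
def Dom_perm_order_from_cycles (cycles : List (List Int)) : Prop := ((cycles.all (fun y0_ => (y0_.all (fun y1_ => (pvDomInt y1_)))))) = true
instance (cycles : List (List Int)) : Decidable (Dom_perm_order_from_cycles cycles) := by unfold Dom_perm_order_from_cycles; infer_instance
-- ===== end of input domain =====

-- B replaces A's running gcd-based LCM fold by a different algorithm: trial-division prime
-- factorization of each cycle length, a dict of maximum exponents per prime, and a final
-- product of prime^exponent (objective: alternative).

-- ===== PORT A =====
def perm_order_from_cycles (cycles : List (List Int)) : Int :=
  let lengths : List Int := cycles.map (fun c => (c.length : Int))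
  match lengths with
  | [] => 1
  | l0 :: rest =>
    rest.foldl (fun result l =>
      PySem.Int.floordiv (result * l) ((Int.gcd result l : Nat) : Int)) l0

-- ===== PORT B =====
-- Inner `while n % d == 0` loop of _factorize: returns (exponent, remaining n).
-- Guards `2 ≤ d` / `0 < n` are for termination only; they hold at every reachable call.
def pvDivOut (d n : Nat) : Nat × Nat :=
  if h : 2 ≤ d ∧ 0 < n ∧ n % d = 0 then
    let r := pvDivOut d (n / d)
    (r.1 + 1, r.2)
  else (0, n)
termination_by n
decreasing_by exact Nat.div_lt_self h.2.1 (by omega)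

-- needed by pvFactorAux's termination proof, so it stays above the port
theorem pvDivOut_snd_le (d n : Nat) : (pvDivOut d n).2 ≤ n := by
  induction n using pvDivOut.induct d with
  | case1 n h ih => rw [pvDivOut, dif_pos h]; exact le_trans ih (Nat.div_le_self n d)
  | case2 n h => rw [pvDivOut, dif_neg h]

-- Outer `while d * d <= n` loop of _factorize, then the trailing `if n > 1`.
-- Guard `2 ≤ dvr` is for termination only; dvr starts at 2 and only increases.
def pvFactorAux (dvr n : Nat) (acc : PySem.Dict Nat Nat) : PySem.Dict Nat Nat :=
  if h : dvr * dvr ≤ n ∧ 2 ≤ dvr then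
    let r := pvDivOut dvr n
    pvFactorAux (dvr + 1) r.2 (if 0 < r.1 then acc.insert dvr r.1 else acc)
  else if 1 < n then acc.insert n 1 else acc
termination_by n + 2 - dvr
decreasing_by
  have h1 : (pvDivOut dvr n).2 ≤ n := pvDivOut_snd_le dvr n
  have h2 : dvr ≤ n := Nat.le_trans (Nat.le_mul_of_pos_left dvr (by omega)) h.1
  omega

def pvFactorize (n : Nat) : PySem.Dict Nat Nat := pvFactorAux 2 n PySem.Dict.empty

-- `for p, e in _factorize(l).items(): if e > maxexp.get(p, 0): maxexp[p] = e`
def pvMergeMax (m : PySem.Dict Nat Nat) (f : List (Nat × Nat)) : PySem.Dict Nat Nat :=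
  f.foldl (fun m pe => if m.getD pe.1 0 < pe.2 then m.insert pe.1 pe.2 else m) m

-- Main loop over cycles (with the early `return 0`); on exhaustion, the final product loop.
def pvOrderLoop (cycles : List (List Int)) (maxexp : PySem.Dict Nat Nat) : Int :=
  match cycles with
  | [] => ((maxexp.items.foldl (fun r pe => r * pe.1 ^ pe.2) 1 : Nat) : Int)
  | c :: rest =>
    if c.length = 0 then 0
    else pvOrderLoop rest (pvMergeMax maxexp (pvFactorize c.length).items)

def perm_order_from_cycles_alt (cycles : List (List Int)) : Int :=
  pvOrderLoop cycles PySem.Dict.empty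

-- ===== PRECONDITION & SPEC =====
-- Pre_ excludes exactly the inputs on which A raises ZeroDivisionError: those with at
-- least two empty cycles (there result and l are both 0, so `// gcd(0, 0)` divides by 0).
def Pre_perm_order_from_cycles (cycles : List (List Int)) : Prop :=
  (cycles.countP (fun c => c.length == 0)) ≤ 1
instance (cycles : List (List Int)) : Decidable (Pre_perm_order_from_cycles cycles) := by
  unfold Pre_perm_order_from_cycles; infer_instance

def pvWitness_perm_order_from_cycles : List (List Int) := [[1, 2], [3, 4, 5], []]

def Spec_perm_order_from_cycles (cycles : List (List Int)) (out : Int) : Prop :=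
  out = perm_order_from_cycles_alt cycles
instance (cycles : List (List Int)) (out : Int) : Decidable (Spec_perm_order_from_cycles cycles out) := by
  unfold Spec_perm_order_from_cycles; infer_instance

-- ===== CLAIM (what is proved, stated in full; the proofs are below) =====
def Claim_equal_perm_order_from_cycles : Prop := ∀ (cycles : List (List Int)), Dom_perm_order_from_cycles cycles → Pre_perm_order_from_cycles cycles → Spec_perm_order_from_cycles cycles (perm_order_from_cycles cycles)

-- ===== LEMMAS AND PROOFS =====

theorem pvDivOut_spec (d n : Nat) (hd : 2 ≤ d) (hn : 0 < n) :
    n = d ^ (pvDivOut d n).1 * (pvDivOut d n).2 ∧ ¬ d ∣ (pvDivOut d n).2 ∧ 0 < (pvDivOut d n).2 := by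
  induction n using pvDivOut.induct d with
  | case1 n h ih =>
    have hdvd : d ∣ n := Nat.dvd_of_mod_eq_zero h.2.2
    have hpos : 0 < n / d := Nat.div_pos (Nat.le_of_dvd h.2.1 hdvd) (by omega)
    obtain ⟨h1, h2, h3⟩ := ih hpos
    rw [pvDivOut, dif_pos h]
    refine ⟨?_, h2, h3⟩
    simp only
    calc n = n / d * d := (Nat.div_mul_cancel hdvd).symm
    _ = d ^ (pvDivOut d (n / d)).1 * (pvDivOut d (n / d)).2 * d := by rw [← h1]
    _ = d ^ ((pvDivOut d (n / d)).1 + 1) * (pvDivOut d (n / d)).2 := by ring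
  | case2 n h =>
    rw [pvDivOut, dif_neg h]
    refine ⟨by simp, ?_, hn⟩
    intro hdvd
    exact h ⟨hd, hn, Nat.mod_eq_zero_of_dvd hdvd⟩

theorem pvFactorAux_eq_pos (dvr n : Nat) (acc : PySem.Dict Nat Nat)
    (h : dvr * dvr ≤ n ∧ 2 ≤ dvr) :
    pvFactorAux dvr n acc = pvFactorAux (dvr + 1) (pvDivOut dvr n).2
      (if 0 < (pvDivOut dvr n).1 then acc.insert dvr (pvDivOut dvr n).1 else acc) := by
  rw [pvFactorAux, dif_pos h]

theorem pvFactorAux_eq_neg (dvr n : Nat) (acc : PySem.Dict Nat Nat)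
    (h : ¬(dvr * dvr ≤ n ∧ 2 ≤ dvr)) :
    pvFactorAux dvr n acc = if 1 < n then acc.insert n 1 else acc := by
  rw [pvFactorAux, dif_neg h]

theorem pvFactorAux_spec (dvr n : Nat) (acc : PySem.Dict Nat Nat)
    (hd : 2 ≤ dvr) (hn : 0 < n) (hfac : ∀ p, p.Prime → p ∣ n → dvr ≤ p)
    (hk : ∀ q ∈ acc.keys, Nat.Prime q ∧ q < dvr) (hnd : acc.keys.Nodup) :
    (∀ q ∈ (pvFactorAux dvr n acc).keys, Nat.Prime q) ∧
    (pvFactorAux dvr n acc).keys.Nodup ∧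
    (∀ q, (pvFactorAux dvr n acc).getD q 0 = acc.getD q 0 + n.factorization q) := by
  induction dvr, n, acc using pvFactorAux.induct with
  | case1 dvr n acc h r ih =>
    simp only [dite_eq_ite] at ih
    obtain ⟨hs1, hs2, hs3⟩ := pvDivOut_spec dvr n h.2 hn
    have hr2n : (pvDivOut dvr n).2 ∣ n := Dvd.intro_left _ hs1.symm
    rw [pvFactorAux_eq_pos dvr n acc h]
    by_cases hr1 : 0 < (pvDivOut dvr n).1
    · have hdvd : dvr ∣ n := by
        have hh : dvr ∣ dvr ^ (pvDivOut dvr n).1 * (pvDivOut dvr n).2 :=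
          Dvd.dvd.mul_right (dvd_pow_self dvr (by omega)) _
        rw [← hs1] at hh; exact hh
      have hp : Nat.Prime dvr := by
        by_contra hnp
        have hm := Nat.minFac_prime (n := dvr) (by omega)
        have h1 : dvr ≤ dvr.minFac := hfac _ hm (dvd_trans (Nat.minFac_dvd dvr) hdvd)
        have h2 : dvr.minFac = dvr := le_antisymm (Nat.minFac_le (by omega)) h1
        exact hnp (h2 ▸ hm)
      have hfac' : ∀ p, p.Prime → p ∣ (pvDivOut dvr n).2 → dvr + 1 ≤ p := by
        intro p hpp hpd
        have h1 := hfac p hpp (dvd_trans hpd hr2n)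
        rcases Nat.lt_or_ge p (dvr + 1) with hlt | hge
        · exfalso
          have hpe : p = dvr := by omega
          exact hs2 (hpe ▸ hpd)
        · exact hge
      have hnotmem : dvr ∉ acc.keys := fun hmem => by have := (hk dvr hmem).2; omega
      have hk' : ∀ q ∈ (acc.insert dvr (pvDivOut dvr n).1).keys, Nat.Prime q ∧ q < dvr + 1 := by
        intro q hq
        rcases (PySem.Dict.mem_keys_insert _ _ _ _).mp hq with hq | hq
        · exact ⟨hq ▸ hp, by omega⟩
        · exact ⟨(hk q hq).1, by have := (hk q hq).2; omega⟩
      have hnd' : (acc.insert dvr (pvDivOut dvr n).1).keys.Nodup :=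
        PySem.Dict.nodup_keys_insert acc _ _ hnd
      rw [if_pos hr1]
      rw [if_pos hr1] at ih
      obtain ⟨K, N, G⟩ := ih (by omega) hs3 hfac' hk' hnd'
      refine ⟨K, N, ?_⟩
      intro q
      have hGq : (pvFactorAux (dvr + 1) (pvDivOut dvr n).2 (acc.insert dvr (pvDivOut dvr n).1)).getD q 0
          = (acc.insert dvr (pvDivOut dvr n).1).getD q 0 + (pvDivOut dvr n).2.factorization q := G q
      rw [hGq]
      have hfn : n.factorization q = (if dvr = q then (pvDivOut dvr n).1 else 0)
          + (pvDivOut dvr n).2.factorization q := by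
        conv_lhs => rw [hs1]
        rw [Nat.factorization_mul (by positivity) (by omega), hp.factorization_pow]
        simp [Finsupp.single_apply]
      have hins : (acc.insert dvr (pvDivOut dvr n).1).getD q 0
          = if q = dvr then (pvDivOut dvr n).1 else acc.getD q 0 :=
        PySem.Dict.getD_insert acc dvr q _ _
      rw [hins, hfn]
      by_cases hq : q = dvr
      · subst hq
        have hacc0 : acc.getD q 0 = 0 :=
          PySem.Dict.getD_of_not_contains acc 0
            (by rw [PySem.Dict.contains_eq_decide_mem_keys]; exact decide_eq_false hnotmem)
        simp [hacc0]
      · rw [if_neg hq, if_neg (fun h => hq (h.symm))]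
        omega
    · -- dvr does not divide n: exponent 0, n unchanged
      have hr0 : (pvDivOut dvr n).1 = 0 := by omega
      have hr2 : (pvDivOut dvr n).2 = n := by
        rw [hr0] at hs1; simpa using hs1.symm
      have hndvd : ¬ dvr ∣ n := by rw [← hr2]; exact hs2
      have hfac' : ∀ p, p.Prime → p ∣ (pvDivOut dvr n).2 → dvr + 1 ≤ p := by
        intro p hpp hpd
        have h1 := hfac p hpp (hr2 ▸ hpd)
        rcases Nat.lt_or_ge p (dvr + 1) with hlt | hge
        · exfalso
          have hpe : p = dvr := by omega
          rw [hpe, hr2] at hpd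
          exact hndvd hpd
        · exact hge
      rw [if_neg hr1]
      rw [if_neg hr1] at ih
      obtain ⟨K, N, G⟩ := ih (by omega) (hr2 ▸ hn) hfac'
        (fun q hq => ⟨(hk q hq).1, by have := (hk q hq).2; omega⟩) hnd
      exact ⟨K, N, fun q => by rw [G q, hr2]⟩
  | case2 dvr n acc h h1 =>
    rw [pvFactorAux_eq_neg dvr n acc h, if_pos h1]
    have hnp : Nat.Prime n := by
      by_contra hnp
      have hm := Nat.minFac_prime (n := n) (by omega)
      have hge : dvr ≤ n.minFac := hfac _ hm (Nat.minFac_dvd n)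
      have hsq := Nat.minFac_sq_le_self (by omega) hnp
      have : dvr * dvr ≤ n := by nlinarith [Nat.minFac_dvd n]
      exact h ⟨this, hd⟩
    have hnotmem : n ∉ acc.keys := fun hmem => by
      have h2 := (hk n hmem).2
      have := hfac n hnp dvd_rfl
      omega
    refine ⟨?_, PySem.Dict.nodup_keys_insert acc _ _ hnd, ?_⟩
    · intro q hq
      rcases (PySem.Dict.mem_keys_insert _ _ _ _).mp hq with hq | hq
      · exact hq ▸ hnp
      · exact (hk q hq).1
    · intro q
      rw [PySem.Dict.getD_insert acc n q 1 0, hnp.factorization]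
      by_cases hq : q = n
      · subst hq
        have hacc0 : acc.getD q 0 = 0 :=
          PySem.Dict.getD_of_not_contains acc 0
            (by rw [PySem.Dict.contains_eq_decide_mem_keys]; exact decide_eq_false hnotmem)
        simp [hacc0]
      · rw [if_neg hq]
        simp [Ne.symm hq]
  | case3 dvr n acc h h1 =>
    rw [pvFactorAux_eq_neg dvr n acc h, if_neg h1]
    have hn1 : n = 1 := by omega
    subst hn1
    exact ⟨fun q hq => (hk q hq).1, hnd, fun q => by simp⟩

theorem pvMergeMax_getD (f : List (Nat × Nat)) (g : Nat → Nat)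
    (hg : ∀ pe ∈ f, pe.2 = g pe.1) :
    ∀ (D : PySem.Dict Nat Nat) (q : Nat),
    (pvMergeMax D f).getD q 0 =
      if q ∈ f.map Prod.fst then max (D.getD q 0) (g q) else D.getD q 0 := by
  induction f with
  | nil => intro D q; simp [pvMergeMax]
  | cons pe rest ih =>
    intro D q
    have hgr : ∀ pe' ∈ rest, pe'.2 = g pe'.1 := fun pe' h => hg pe' (List.mem_cons_of_mem _ h)
    have hstep : ∀ q', (if D.getD pe.1 0 < pe.2 then D.insert pe.1 pe.2 else D).getD q' 0 =
        if q' = pe.1 then max (D.getD pe.1 0) pe.2 else D.getD q' 0 := by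
      intro q'
      by_cases hlt : D.getD pe.1 0 < pe.2
      · rw [if_pos hlt, PySem.Dict.getD_insert]
        by_cases hq' : q' = pe.1
        · rw [if_pos hq', if_pos hq']; omega
        · rw [if_neg hq', if_neg hq']
      · rw [if_neg hlt]
        by_cases hq' : q' = pe.1
        · rw [if_pos hq', hq']; omega
        · rw [if_neg hq']
    have hm : pvMergeMax D (pe :: rest)
        = pvMergeMax (if D.getD pe.1 0 < pe.2 then D.insert pe.1 pe.2 else D) rest := by
      simp [pvMergeMax]
    rw [hm, ih hgr]
    have hpe2 : pe.2 = g pe.1 := hg pe (List.mem_cons_self)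
    have hcons : (q ∈ (pe :: rest).map Prod.fst) ↔ (q = pe.1 ∨ q ∈ rest.map Prod.fst) := by
      simp [eq_comm]
    by_cases hmem : q ∈ rest.map Prod.fst
    · rw [if_pos hmem, if_pos (hcons.mpr (Or.inr hmem)), hstep q]
      by_cases hq : q = pe.1
      · subst hq; rw [if_pos rfl, ← hpe2]; omega
      · rw [if_neg hq]
    · rw [if_neg hmem, hstep q]
      by_cases hq : q = pe.1
      · subst hq; rw [if_pos rfl, if_pos (hcons.mpr (Or.inl rfl)), ← hpe2]
      · rw [if_neg hq, if_neg (fun hmem2 => by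
          rcases hcons.mp hmem2 with hh | hh
          · exact hq hh
          · exact hmem hh)]

theorem pvMergeMax_keys_nodup (f : List (Nat × Nat)) :
    ∀ (D : PySem.Dict Nat Nat), D.keys.Nodup → (pvMergeMax D f).keys.Nodup := by
  induction f with
  | nil => intro D h; simpa [pvMergeMax] using h
  | cons pe rest ih =>
    intro D h
    have hm : pvMergeMax D (pe :: rest)
        = pvMergeMax (if D.getD pe.1 0 < pe.2 then D.insert pe.1 pe.2 else D) rest := by
      simp [pvMergeMax]
    rw [hm]
    apply ih
    by_cases hlt : D.getD pe.1 0 < pe.2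
    · rw [if_pos hlt]; exact PySem.Dict.nodup_keys_insert D _ _ h
    · rw [if_neg hlt]; exact h

theorem pvFoldMul (l : List (Nat × Nat)) :
    ∀ (a : Nat), l.foldl (fun r pe => r * pe.1 ^ pe.2) a = a * (l.map (fun pe => pe.1 ^ pe.2)).prod := by
  induction l with
  | nil => intro a; simp
  | cons pe rest ih => intro a; simp [ih]; ring

theorem pvProdItems (Dd : PySem.Dict Nat Nat) (M : Nat) (hM : 0 < M)
    (hnd : Dd.keys.Nodup)
    (hG : ∀ q, Dd.getD q 0 = M.factorization q) :
    Dd.items.foldl (fun r pe => r * pe.1 ^ pe.2) 1 = M := by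
  rw [pvFoldMul, one_mul]
  have h1 : Dd.items.map (fun pe => pe.1 ^ pe.2)
      = Dd.keys.map (fun p => p ^ M.factorization p) := by
    have : Dd.keys.map (fun p => p ^ M.factorization p)
        = Dd.items.map (fun pe => pe.1 ^ M.factorization pe.1) := by
      show (Dd.items.map (·.1)).map _ = _
      rw [List.map_map]; rfl
    rw [this]
    apply List.map_congr_left
    intro pe hpe
    have := PySem.Dict.getD_of_mem_items Dd (k := pe.1) (v := pe.2) hpe hnd 0
    rw [← hG pe.1, this]
  rw [h1, ← List.prod_toFinset _ hnd]
  have hsub : M.factorization.support ⊆ Dd.keys.toFinset := by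
    intro p hp
    rw [Finsupp.mem_support_iff] at hp
    rw [← hG p] at hp
    have hc : Dd.contains p = true := by
      by_contra hc
      rw [PySem.Dict.getD_of_not_contains Dd 0 (by simpa using hc)] at hp
      exact hp rfl
    exact List.mem_toFinset.mpr ((PySem.Dict.contains_iff_mem_keys Dd p).mp hc)
  rw [← Finset.prod_subset hsub (by
    intro p _ hp
    rw [Finsupp.mem_support_iff, not_not] at hp
    rw [hp, pow_zero])]
  exact Nat.prod_factorization_pow_eq_self (by omega)

theorem pvFactorize_spec (n : Nat) (hn : 0 < n) :
    (pvFactorize n).keys.Nodup ∧ (∀ q, (pvFactorize n).getD q 0 = n.factorization q) := by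
  unfold pvFactorize
  obtain ⟨_, N, G⟩ := pvFactorAux_spec 2 n PySem.Dict.empty (le_refl 2) hn
    (fun p hp _ => hp.two_le) (by simp [PySem.Dict.keys_empty]) (by simp [PySem.Dict.keys_empty])
  exact ⟨N, fun q => by rw [G q, PySem.Dict.getD_empty, Nat.zero_add]⟩

theorem pvFoldlLcmZero (ls : List Nat) : ls.foldl Nat.lcm 0 = 0 := by
  induction ls with
  | nil => rfl
  | cons l rest ih => simpa [Nat.lcm_zero_left] using ih

theorem pvOrderLoop_spec (cycles : List (List Int)) :
    ∀ (Dd : PySem.Dict Nat Nat) (M : Nat), 0 < M → Dd.keys.Nodup →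
    (∀ q, Dd.getD q 0 = M.factorization q) →
    pvOrderLoop cycles Dd = (((cycles.map (fun c => c.length)).foldl Nat.lcm M : Nat) : Int) := by
  induction cycles with
  | nil =>
    intro Dd M hM hnd hG
    simp only [pvOrderLoop, List.map_nil, List.foldl_nil]
    rw [pvProdItems Dd M hM hnd hG]
  | cons c rest ih =>
    intro Dd M hM hnd hG
    simp only [pvOrderLoop, List.map_cons, List.foldl_cons]
    by_cases hl : c.length = 0
    · rw [if_pos hl, hl, Nat.lcm_zero_right, pvFoldlLcmZero]
      rfl
    · rw [if_neg hl]
      have hlpos : 0 < c.length := Nat.pos_of_ne_zero hl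
      obtain ⟨NF, GF⟩ := pvFactorize_spec c.length hlpos
      have hgmatch : ∀ pe ∈ (pvFactorize c.length).items, pe.2 = c.length.factorization pe.1 := by
        intro pe hpe
        rw [← GF pe.1]
        exact (PySem.Dict.getD_of_mem_items _ hpe NF 0).symm
      have hlcmpos : 0 < Nat.lcm M c.length :=
        Nat.pos_of_ne_zero (Nat.lcm_ne_zero (by omega) hl)
      have hG' : ∀ q, (pvMergeMax Dd (pvFactorize c.length).items).getD q 0
          = (Nat.lcm M c.length).factorization q := by
        intro q
        rw [pvMergeMax_getD _ _ hgmatch Dd q,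
          Nat.factorization_lcm (by omega) hl, Finsupp.sup_apply]
        by_cases hmem : q ∈ (pvFactorize c.length).items.map Prod.fst
        · rw [if_pos hmem, ← hG q]
        · rw [if_neg hmem]
          have hq0 : c.length.factorization q = 0 := by
            rw [← GF q]
            apply PySem.Dict.getD_of_not_contains
            by_contra hc
            have hc' : (pvFactorize c.length).contains q = true := by
              cases hcc : (pvFactorize c.length).contains q
              · exact absurd hcc hc
              · rfl
            exact hmem (by
              have := (PySem.Dict.contains_iff_mem_keys _ q).mp hc'
              simpa [PySem.Dict.keys] using this)
          rw [← hG q, hq0]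
          simp
      exact ih _ (Nat.lcm M c.length) hlcmpos
        (pvMergeMax_keys_nodup _ Dd hnd) hG'


-- ---- A-side: the gcd-based fold computes the Nat.lcm fold ----

-- One step of A's loop, on naturals, is Nat.lcm.
theorem pvStep_eq_lcm (a l : Nat) :
    PySem.Int.floordiv ((a : Int) * (l : Int)) ((Int.gcd (a : Int) (l : Int) : Nat) : Int)
      = ((Nat.lcm a l : Nat) : Int) := by
  have hg : Int.gcd (a : Int) (l : Int) = Nat.gcd a l := by
    simp [Int.gcd]
  rw [hg]
  have : ((a : Int) * (l : Int)) = ((a * l : Nat) : Int) := by push_cast; ring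
  rw [this, PySem.Int.floordiv_natCast]
  rfl

-- A's fold equals the Nat.lcm fold, provided at most one zero is ever involved.
theorem pvFold_eq_lcm (ls : List Nat) : ∀ (a : Nat),
    ls.countP (fun l => l == 0) + (if a = 0 then 1 else 0) ≤ 1 →
    (ls.map (fun (l : Nat) => (l : Int))).foldl (fun result l =>
        PySem.Int.floordiv (result * l) ((Int.gcd result l : Nat) : Int)) (a : Int)
      = ((ls.foldl Nat.lcm a : Nat) : Int) := by
  induction ls with
  | nil => intro a _; simp
  | cons l ls ih =>
    intro a h
    rw [List.countP_cons] at h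
    simp only [beq_iff_eq] at h
    simp only [List.map_cons, List.foldl_cons]
    rw [pvStep_eq_lcm a l]
    apply ih
    have hiff := Nat.lcm_eq_zero_iff (m := a) (n := l)
    split_ifs at h ⊢ <;> omega

theorem pvA_eq_lcmFold (cycles : List (List Int))
    (hpre : Pre_perm_order_from_cycles cycles) :
    perm_order_from_cycles cycles
      = (((cycles.map (fun c => c.length)).foldl Nat.lcm 1 : Nat) : Int) := by
  unfold perm_order_from_cycles Pre_perm_order_from_cycles at *
  cases cycles with
  | nil => simp
  | cons c cs =>
    simp only [List.map_cons, List.foldl_cons, Nat.lcm_one_left]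
    have hcount : (cs.map (fun c => c.length)).countP (fun l => l == 0)
        + (if c.length = 0 then 1 else 0) ≤ 1 := by
      rw [List.countP_cons] at hpre
      have hce : (cs.map (fun c => c.length)).countP (fun l => l == 0)
          = cs.countP (fun c => c.length == 0) := by
        rw [List.countP_map]; rfl
      rw [hce]
      simp only [beq_iff_eq] at hpre ⊢
      split_ifs at hpre ⊢ <;> omega
    have hmm : cs.map (fun c => ((c.length : Nat) : Int))
        = (cs.map (fun c => c.length)).map (fun (l : Nat) => (l : Int)) := by
      simp
    rw [hmm]
    exact pvFold_eq_lcm (cs.map (fun c => c.length)) c.length hcount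

-- ---- B-side: the max-exponent dict computes the Nat.lcm fold ----

theorem pvB_eq_lcmFold (cycles : List (List Int)) :
    perm_order_from_cycles_alt cycles
      = (((cycles.map (fun c => c.length)).foldl Nat.lcm 1 : Nat) : Int) := by
  unfold perm_order_from_cycles_alt
  exact pvOrderLoop_spec cycles PySem.Dict.empty 1 one_pos
    (by simp [PySem.Dict.keys_empty])
    (fun q => by rw [PySem.Dict.getD_empty, Nat.factorization_one]; rfl)

-- ===== VERDICT (by name: the statement is the Claim_ definition above) =====
theorem perm_order_from_cycles_spec : Claim_equal_perm_order_from_cycles := by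
  intro cycles _ hpre
  unfold Spec_perm_order_from_cycles
  rw [pvA_eq_lcmFold cycles hpre, pvB_eq_lcmFold cycles]
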